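-- pv_equiv track=rewrite | github.com/SajjadMazhar/Codewars-kata-solutions | pirateCode.py | amaro_plan
-- ===== SOURCE A (Python) =====
-- def amaro_plan(pirate_num):
--     gold=pirate_num*20
--     p_list=[gold]
--     m=1
--     for i in range(pirate_num-1):
--         m=1-m
--         if m==1:
--             p_list[0]=p_list[0]-1
--             p_list.append(m)
--         else:
--             p_list.append(m)
--     return p_list
-- ===== SOURCE B (Python) =====
-- def amaro_plan(pirate_num):
--     n = pirate_num - 1
--     tail = ([0, 1] * n)[:n]
--     return [pirate_num * 20 - sum(tail)] + tail
-- ===== Notes on version B (the rewrite author's own statement) =====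
-- stated objective: simpler
-- what changed: Replaces A's stateful single pass (toggling m, decrementing the head in place while appending) with pattern replication: the tail is the literal pattern [0,1] repeated and sliced to length, and the head is adjusted once by the tail's sum.
import Mathlib
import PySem

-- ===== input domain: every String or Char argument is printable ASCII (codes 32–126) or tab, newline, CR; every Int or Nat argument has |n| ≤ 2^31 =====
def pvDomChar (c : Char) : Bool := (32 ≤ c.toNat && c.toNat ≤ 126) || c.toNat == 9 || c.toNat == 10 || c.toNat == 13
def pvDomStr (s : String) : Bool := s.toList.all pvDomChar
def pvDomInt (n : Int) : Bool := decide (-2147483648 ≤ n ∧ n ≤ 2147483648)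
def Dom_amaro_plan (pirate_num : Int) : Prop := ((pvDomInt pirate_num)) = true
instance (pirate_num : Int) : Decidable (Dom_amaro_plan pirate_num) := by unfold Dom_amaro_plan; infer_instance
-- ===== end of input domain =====

-- B replaces A's stateful toggle loop (decrement head, append each bit) by pattern replication:
-- the tail is [0,1] repeated and sliced to length, the head adjusted once by the tail's sum (simpler).

-- ===== PORT A =====
def amaro_plan (pirate_num : Int) : List Int :=
  let gold := pirate_num * 20
  let st := (PySem.List.pyRange 0 (pirate_num - 1) 1).foldl
    (fun (s : List Int × Int) _ =>
      let m := 1 - s.2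
      if m == 1 then
        ((match s.1 with | [] => [] | h :: t => (h - 1) :: t) ++ [m], m)
      else (s.1 ++ [m], m))
    ([gold], 1)
  st.1

-- ===== PORT B =====
def amaro_plan_alt (pirate_num : Int) : List Int :=
  let n := pirate_num - 1
  let tail := PySem.List.slice (PySem.List.pyRepeat ([0, 1] : List Int) n) none (some n)
  (pirate_num * 20 - tail.sum) :: tail

-- ===== PRECONDITION & SPEC =====
def Spec_amaro_plan (pirate_num : Int) (out : List Int) : Prop := out = amaro_plan_alt pirate_num
instance (pirate_num : Int) (out : List Int) : Decidable (Spec_amaro_plan pirate_num out) := by unfold Spec_amaro_plan; infer_instance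

-- ===== CLAIM (what is proved, stated in full; the proofs are below) =====
def Claim_equal_amaro_plan : Prop := ∀ (pirate_num : Int), Dom_amaro_plan pirate_num → Spec_amaro_plan pirate_num (amaro_plan pirate_num)

-- ===== LEMMAS AND PROOFS =====

-- the alternating tail of length k, as a closed form shared by both sides
def pvTail (k : Nat) : List Int := (List.range k).map (fun i => if i % 2 = 1 then (1 : Int) else 0)

theorem pv_repeat_eq (m : Nat) :
    (List.replicate m ([0, 1] : List Int)).flatten = pvTail (2 * m) := by
  induction m with
  | zero => simp [pvTail]
  | succ m ih =>
    have h2 : 2 * (m + 1) = 2 * m + 1 + 1 := by ring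
    rw [List.replicate_succ' , List.flatten_append, ih]
    simp only [pvTail, h2, List.range_succ, List.map_append, List.flatten_cons,
      List.flatten_nil, List.append_nil, List.map_cons, List.map_nil]
    have e0 : (2 * m) % 2 = 0 := by omega
    have e1 : (2 * m + 1) % 2 = 1 := by omega
    simp [e0, e1]

theorem pv_take_tail (k m : Nat) (h : k ≤ 2 * m) :
    (pvTail (2 * m)).take k = pvTail k := by
  unfold pvTail
  rw [← List.map_take, List.take_range, Nat.min_eq_left h]

theorem pv_fold_inv (g : Int) (k : Nat) :
    (PySem.List.pyRange 0 (k : Int) 1).foldl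
      (fun (s : List Int × Int) _ =>
        let m := 1 - s.2
        if m == 1 then
          ((match s.1 with | [] => [] | h :: t => (h - 1) :: t) ++ [m], m)
        else (s.1 ++ [m], m))
      ([g], 1)
    = ((g - (pvTail k).sum) :: pvTail k, if k % 2 = 0 then 1 else 0) := by
  induction k with
  | zero => simp [PySem.List.pyRange_one_eq_nil, pvTail]
  | succ k ih =>
    have h : ((k + 1 : Nat) : Int) = (k : Int) + 1 := by push_cast; ring
    rw [h, PySem.List.pyRange_one_succ_right (by positivity), List.foldl_append, ih]
    simp only [List.foldl_cons, List.foldl_nil, pvTail, List.range_succ, List.map_append,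
      List.map_cons, List.map_nil, List.sum_append]
    rcases Nat.even_or_odd k with he | ho
    · have hk0 : k % 2 = 0 := Nat.even_iff.mp he
      simp [hk0]; omega
    · have hk1 : k % 2 = 1 := Nat.odd_iff.mp ho
      simp [hk1]; omega

theorem pv_alt_eq (n : Int) :
    amaro_plan_alt n = (n * 20 - (pvTail (n - 1).toNat).sum) :: pvTail (n - 1).toNat := by
  simp only [amaro_plan_alt, PySem.List.pyRepeat]
  by_cases h : n - 1 ≤ 0
  · have h0 : (n - 1).toNat = 0 := by omega
    simp [h0, pvTail, PySem.List.slice]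
  · obtain ⟨k, hk, hk'⟩ : ∃ k : Nat, n - 1 = (k : Int) ∧ (n - 1).toNat = k :=
      ⟨(n - 1).toNat, by omega, rfl⟩
    rw [hk', hk, pv_repeat_eq, PySem.List.slice_to_natCast,
      pv_take_tail _ _ (by omega)]

-- ===== VERDICT (by name: the statement is the Claim_ definition above) =====
theorem amaro_plan_spec : Claim_equal_amaro_plan := by
  intro n _
  unfold Spec_amaro_plan
  rw [pv_alt_eq]
  unfold amaro_plan
  by_cases h : n - 1 ≤ 0
  · have h0 : (n - 1).toNat = 0 := by omega
    simp [PySem.List.pyRange_one_eq_nil h, h0, pvTail]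
  · obtain ⟨k, hk, hk'⟩ : ∃ k : Nat, n - 1 = (k : Int) ∧ (n - 1).toNat = k :=
      ⟨(n - 1).toNat, by omega, rfl⟩
    rw [hk', hk]
    simp only [pv_fold_inv]
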